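-- pv_equiv track=rewrite | github.com/jinyoong/SWEA | Python_intermediate/4835. 구간합.py | guganhap
-- ===== SOURCE A (Python) =====
-- def guganhap(n, m, numbers):
--     """
--     :param n: numbers 리스트의 길이
--     :param m: 합을 구해야 하는 구간의 길이
--     :param numbers: 정수가 들어있는 리스트
--     :return: 가장 큰 구간합과 가장 작은 구간합의 차이를 반환
--     n개의 길이를 가지는 numbers 리스트에서 m개식 나누어 더해야 한다
--     즉 n = 5, m = 3 이라면 (0, 1, 2), (1, 2, 3), (2, 3, 4) 의 3가지 경우가 나온다
--     시작하는 인덱스는 0 ~ 2 인데 이는 0 ~ n-m 까지라고 볼 수 있다.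
--     따라서 반복문을 해당 횟수만큼 진행하며 시작 인덱스를 정하고
--     시작 인덱스부터 m개의 숫자를 더하면 되므로 반복문을 추가한다.
--     """
--     max_hap = 0
--     min_hap = 0
--     for i in range(n-m+1):
--         # 시작 인덱스를 정하는 반복문
--         gugan_hap = 0
--         for j in range(i, i+m):
--             # 시작 인덱스부터 연속한 m개의 숫자를 모두 더하는 반복문
--             gugan_hap += numbers[j]
--         if i == 0:
--             # 제일 처음 나오는 구간합을 최대, 최소로 지정하자
--             min_hap = max_hap = gugan_hap
--         else:
--             if max_hap < gugan_hap:
--                 max_hap = gugan_hap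
--             if min_hap > gugan_hap:
--                 min_hap = gugan_hap
--     return max_hap - min_hap
-- ===== SOURCE B (Python) =====
-- def guganhap(n, m, numbers):
--     if n - m + 1 <= 0 or m <= 0:
--         return 0
--     s = sum(numbers[:m])
--     mx = mn = s
--     for i in range(1, n - m + 1):
--         s += numbers[i + m - 1] - numbers[i - 1]
--         if s > mx:
--             mx = s
--         if s < mn:
--             mn = s
--     return mx - mn
-- ===== Notes on version B (the rewrite author's own statement) =====
-- stated objective: alternative
-- what changed: B makes one sliding-window pass, updating the window sum incrementally (add the entering element, drop the leaving one) and tracking max/min on the fly, instead of A's nested loops that re-sum each m-length window from scratch.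
import Mathlib
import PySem

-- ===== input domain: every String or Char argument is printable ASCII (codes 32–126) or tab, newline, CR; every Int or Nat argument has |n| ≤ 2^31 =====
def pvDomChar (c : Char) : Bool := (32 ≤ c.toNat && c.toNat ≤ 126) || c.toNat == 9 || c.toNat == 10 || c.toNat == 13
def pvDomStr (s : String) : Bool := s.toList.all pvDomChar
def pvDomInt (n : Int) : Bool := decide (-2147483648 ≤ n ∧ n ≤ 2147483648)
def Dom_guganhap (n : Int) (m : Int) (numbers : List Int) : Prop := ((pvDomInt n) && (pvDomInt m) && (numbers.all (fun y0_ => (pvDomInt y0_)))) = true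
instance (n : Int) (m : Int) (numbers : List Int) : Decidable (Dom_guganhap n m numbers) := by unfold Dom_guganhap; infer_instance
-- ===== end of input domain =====

-- B computes the window sums in one sliding-window pass (incremental update) instead of A's nested re-summing loops.

-- ===== PORT A =====
def guganhap (n : Int) (m : Int) (numbers : List Int) : Int :=
  let st := (PySem.List.pyRange 0 (n - m + 1) 1).foldl
    (fun (st : Int × Int) i =>
      let g := (PySem.List.pyRange i (i + m) 1).foldl
        (fun s j => s + PySem.List.pyGetD numbers j 0) 0
      if i = 0 then (g, g)
      else ((if st.1 < g then g else st.1), (if st.2 > g then g else st.2)))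
    (0, 0)
  st.1 - st.2

-- ===== PORT B =====
def guganhap_alt (n : Int) (m : Int) (numbers : List Int) : Int :=
  if n - m + 1 ≤ 0 ∨ m ≤ 0 then 0
  else
    let s0 := (PySem.List.slice numbers none (some m)).sum
    let st := (PySem.List.pyRange 1 (n - m + 1) 1).foldl
      (fun (st : Int × Int × Int) i =>
        let s := st.1 + PySem.List.pyGetD numbers (i + m - 1) 0
                      - PySem.List.pyGetD numbers (i - 1) 0
        (s, (if s > st.2.1 then s else st.2.1), (if s < st.2.2 then s else st.2.2)))
      (s0, s0, s0)
    st.2.1 - st.2.2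

-- ===== PRECONDITION & SPEC =====
-- Pre_ excludes exactly the inputs where A raises IndexError (1 ≤ m ≤ n but numbers shorter than n).
def Pre_guganhap (n : Int) (m : Int) (numbers : List Int) : Prop :=
  m ≤ 0 ∨ n < m ∨ n ≤ (numbers.length : Int)
instance (n : Int) (m : Int) (numbers : List Int) : Decidable (Pre_guganhap n m numbers) := by unfold Pre_guganhap; infer_instance
def pvWitness_guganhap : Int × Int × List Int := (5, 3, [1, 2, 3, 4, 5])

def Spec_guganhap (n : Int) (m : Int) (numbers : List Int) (out : Int) : Prop := out = guganhap_alt n m numbers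
instance (n : Int) (m : Int) (numbers : List Int) (out : Int) : Decidable (Spec_guganhap n m numbers out) := by unfold Spec_guganhap; infer_instance

-- ===== CLAIM (what is proved, stated in full; the proofs are below) =====
def Claim_equal_guganhap : Prop := ∀ (n : Int) (m : Int) (numbers : List Int), Dom_guganhap n m numbers → Pre_guganhap n m numbers → Spec_guganhap n m numbers (guganhap n m numbers)

-- ===== LEMMAS AND PROOFS =====

-- running max/min of g 0 .. g j (A's accumulators)
def runMax (g : Nat → Int) : Nat → Int
  | 0 => g 0
  | j+1 => max (runMax g j) (g (j+1))

def runMin (g : Nat → Int) : Nat → Int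
  | 0 => g 0
  | j+1 => min (runMin g j) (g (j+1))

theorem winsum (ys : List Int) (d : Int) : ∀ (mN : Nat) (k : Nat), k + mN ≤ ys.length → ∀ s0 : Int,
    (List.range mN).foldl (fun s t => s + ys.getD (k + t) d) s0
      = s0 + ((ys.take (k + mN)).sum - (ys.take k).sum) := by
  intro mN
  induction mN with
  | zero => intro k hk s0; simp
  | succ mN ih =>
    intro k hk s0
    rw [List.range_succ, List.foldl_append]
    rw [ih k (by omega) s0]
    have hlt : k + mN < ys.length := by omega
    have hget : ys.getD (k + mN) d = ys[k + mN] := by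
      simp [List.getD_eq_getElem?_getD, List.getElem?_eq_getElem hlt]
    have hsum : (ys.take (k + mN + 1)).sum = (ys.take (k + mN)).sum + ys[k + mN] :=
      List.sum_take_succ ys (k + mN) hlt
    simp only [List.foldl_cons, List.foldl_nil, hget]
    rw [show k + (mN + 1) = k + mN + 1 by omega, hsum]
    ring

theorem outerA (G : Int → Int) : ∀ j : Nat,
    ((List.range (j+1)).map (fun k : Nat => (k : Int))).foldl
      (fun (st : Int × Int) i =>
        let g := G i
        if i = 0 then (g, g)
        else ((if st.1 < g then g else st.1), (if st.2 > g then g else st.2)))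
      (0, 0)
    = (runMax (fun k => G (k : Int)) j, runMin (fun k => G (k : Int)) j) := by
  intro j
  induction j with
  | zero => simp [runMax, runMin]
  | succ j ih =>
    rw [List.range_succ, List.map_append, List.foldl_append, ih]
    have hne : ((j + 1 : Nat) : Int) ≠ 0 := by positivity
    simp only [List.map_cons, List.map_nil, List.foldl_cons, List.foldl_nil, if_neg hne]
    have h1 : (if runMax (fun k => G (k:Int)) j < G ((j+1 : Nat):Int) then G ((j+1 : Nat):Int) else runMax (fun k => G (k:Int)) j) = max (runMax (fun k => G (k:Int)) j) (G ((j+1 : Nat):Int)) := by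
      split_ifs with h <;> omega
    have h2 : (if runMin (fun k => G (k:Int)) j > G ((j+1 : Nat):Int) then G ((j+1 : Nat):Int) else runMin (fun k => G (k:Int)) j) = min (runMin (fun k => G (k:Int)) j) (G ((j+1 : Nat):Int)) := by
      split_ifs with h <;> omega
    simp only [h1, h2, runMax, runMin]

theorem runMax_congr (g h : Nat → Int) : ∀ j : Nat, (∀ k ≤ j, g k = h k) → runMax g j = runMax h j := by
  intro j
  induction j with
  | zero => intro H; simp [runMax, H 0 (by omega)]
  | succ j ih =>
    intro H
    simp [runMax, ih (fun k hk => H k (by omega)), H (j+1) (by omega)]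

theorem runMin_congr (g h : Nat → Int) : ∀ j : Nat, (∀ k ≤ j, g k = h k) → runMin g j = runMin h j := by
  intro j
  induction j with
  | zero => intro H; simp [runMin, H 0 (by omega)]
  | succ j ih =>
    intro H
    simp [runMin, ih (fun k hk => H k (by omega)), H (j+1) (by omega)]

theorem runMax_zero : ∀ j : Nat, runMax (fun _ => (0:Int)) j = 0 := by
  intro j; induction j with
  | zero => rfl
  | succ j ih => simp [runMax, ih]

theorem runMin_zero : ∀ j : Nat, runMin (fun _ => (0:Int)) j = 0 := by
  intro j; induction j with
  | zero => rfl
  | succ j ih => simp [runMin, ih]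

theorem outerB (u1 u2 : Int → Int) (g : Nat → Int) : ∀ j : Nat,
    (∀ k : Nat, k < j → g (k+1) = g k + u1 ((k+1 : Nat) : Int) - u2 ((k+1 : Nat) : Int)) →
    ((List.range j).map (fun t : Nat => (1 : Int) + t)).foldl
      (fun (st : Int × Int × Int) i =>
        let s := st.1 + u1 i - u2 i
        (s, (if s > st.2.1 then s else st.2.1), (if s < st.2.2 then s else st.2.2)))
      (g 0, g 0, g 0)
    = (g j, runMax g j, runMin g j) := by
  intro j
  induction j with
  | zero => intro _; simp [runMax, runMin]
  | succ j ih =>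
    intro H
    rw [List.range_succ, List.map_append, List.foldl_append,
      ih (fun k hk => H k (by omega))]
    simp only [List.map_cons, List.map_nil, List.foldl_cons, List.foldl_nil]
    have hs : g j + u1 ((1 : Int) + j) - u2 ((1 : Int) + j) = g (j+1) := by
      rw [H j (by omega)]
      norm_num [add_comm]
    simp only [hs]
    have h1 : (if g (j+1) > runMax g j then g (j+1) else runMax g j)
        = max (runMax g j) (g (j+1)) := by split_ifs with h <;> omega
    have h2 : (if g (j+1) < runMin g j then g (j+1) else runMin g j)
        = min (runMin g j) (g (j+1)) := by split_ifs with h <;> omega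
    simp only [h1, h2, runMax, runMin]

theorem guganhap_spec : Claim_equal_guganhap := by
  unfold Claim_equal_guganhap
  intro n m numbers _ hpre
  unfold Spec_guganhap guganhap guganhap_alt
  by_cases hK : n - m + 1 ≤ 0
  · rw [PySem.List.pyRange_one_eq_nil (by omega), if_pos (Or.inl hK)]
    simp
  · obtain ⟨j, hj⟩ : ∃ j : Nat, (n - m + 1).toNat = j + 1 := ⟨(n - m + 1).toNat - 1, by omega⟩
    have hrange : PySem.List.pyRange 0 (n - m + 1) 1 = (List.range (j+1)).map (fun k : Nat => (k : Int)) := by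
      rw [PySem.List.pyRange_one]
      simp [hj]
    rw [hrange]
    by_cases hm : m ≤ 0
    · rw [if_pos (Or.inr hm)]
      rw [outerA (fun i => (PySem.List.pyRange i (i + m) 1).foldl
        (fun s j => s + PySem.List.pyGetD numbers j 0) 0) j]
      have hz : (fun k : Nat => (PySem.List.pyRange (k : Int) ((k : Int) + m) 1).foldl
          (fun s j => s + PySem.List.pyGetD numbers j 0) 0) = fun _ => (0 : Int) :=
        funext fun k => by rw [PySem.List.pyRange_one_eq_nil (by omega)]; rfl
      rw [hz, runMax_zero, runMin_zero]
      rfl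
    · -- main case: 1 ≤ m, 1 ≤ n - m + 1
      have hn : n ≤ (numbers.length : Int) := by
        rcases hpre with h | h | h
        · omega
        · omega
        · exact h
      rw [if_neg (by rintro (h | h) <;> omega)]
      set mN := m.toNat with hmN
      set g : Nat → Int := fun k => (numbers.take (k + mN)).sum - (numbers.take k).sum with hg
      -- A side
      rw [outerA (fun i => (PySem.List.pyRange i (i + m) 1).foldl
        (fun s j => s + PySem.List.pyGetD numbers j 0) 0) j]
      have hG : ∀ k : Nat, k ≤ j → (PySem.List.pyRange (k : Int) ((k : Int) + m) 1).foldl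
          (fun s j => s + PySem.List.pyGetD numbers j 0) 0 = g k := by
        intro k hk
        rw [PySem.List.pyRange_one, List.foldl_map]
        have h1 : ((k : Int) + m - k).toNat = mN := by omega
        rw [h1]
        have hstep : (fun (s : Int) (t : Nat) => s + PySem.List.pyGetD numbers ((k : Int) + t) 0)
            = fun s t => s + numbers.getD (k + t) 0 := by
          funext s t
          rw [show (k : Int) + t = ((k + t : Nat) : Int) by push_cast; ring, PySem.List.pyGetD_natCast]
        rw [hstep, winsum numbers 0 mN k (by omega) 0]
        simp [hg]
      rw [runMax_congr _ g j hG, runMin_congr _ g j hG]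
      -- B side
      rw [PySem.List.slice_to numbers (by omega : (0 : Int) ≤ m)]
      have hs0 : (numbers.take m.toNat).sum = g 0 := by
        simp [hg, hmN]
      have hrange1 : PySem.List.pyRange 1 (n - m + 1) 1
          = (List.range j).map (fun t : Nat => (1 : Int) + t) := by
        rw [PySem.List.pyRange_one]
        have : (n - m + 1 - 1).toNat = j := by omega
        rw [this]
      have hOB := outerB (fun i => PySem.List.pyGetD numbers (i + m - 1) 0)
          (fun i => PySem.List.pyGetD numbers (i - 1) 0) g j ?_
      · simp only [hs0, hrange1, hOB]
      · intro k hk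
        have hlt1 : k + mN < numbers.length := by omega
        have hlt2 : k < numbers.length := by omega
        have e1 : ((k + 1 : Nat) : Int) + m - 1 = ((k + mN : Nat) : Int) := by
          push_cast
          omega
        have e2 : ((k + 1 : Nat) : Int) - 1 = ((k : Nat) : Int) := by
          push_cast
          omega
        beta_reduce
        rw [e1, e2, PySem.List.pyGetD_natCast, PySem.List.pyGetD_natCast]
        have d1 : numbers.getD (k + mN) 0 = numbers[k + mN] := by
          simp [List.getD_eq_getElem?_getD, List.getElem?_eq_getElem hlt1]
        have d2 : numbers.getD k 0 = numbers[k] := by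
          simp [List.getD_eq_getElem?_getD, List.getElem?_eq_getElem hlt2]
        have hsum1 : (numbers.take (k + mN + 1)).sum = (numbers.take (k + mN)).sum + numbers[k + mN] :=
          List.sum_take_succ numbers (k + mN) hlt1
        have hsum2 : (numbers.take (k + 1)).sum = (numbers.take k).sum + numbers[k] :=
          List.sum_take_succ numbers k hlt2
        simp only [hg, d1, d2]
        rw [show k + 1 + mN = k + mN + 1 by omega, hsum1, hsum2]
        ring
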